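-- pv_equiv track=rewrite | github.com/shubham15s/DSA-python | interview/steps_needed.py | find_number_steps
-- ===== SOURCE A (Python) =====
-- def find_number_steps(num):
--     seen_numbers = set()
--     steps = 0
--
--     while num not in seen_numbers:
--         seen_numbers.add(num)
--         # Convert the number to a list of digits and sort
--         digits = list(str(num).zfill(4))  # Use zfill to handle leading zeros in 4-digit numbers
--         ascending = int("".join(sorted(digits)))       # Ascending order number
--         descending = int("".join(sorted(digits, reverse=True)))  # Descending order number
--
--         # Calculate the new number by subtracting ascending from descending
--         num = descending - ascending
--         steps += 1
--
--     return steps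
-- ===== SOURCE B (Python) =====
-- def find_number_steps(num):
--     # Same step map as A; but no visited set: O(1) memory, membership by
--     # recomputing the trajectory prefix from the start.
--     def step(n):
--         digits = list(str(n).zfill(4))
--         ascending = int("".join(sorted(digits)))
--         descending = int("".join(sorted(digits, reverse=True)))
--         return descending - ascending
--
--     def seen_before(k, x):
--         # does x occur among the first k trajectory values?
--         t = num
--         for _ in range(k):
--             if t == x:
--                 return True
--             t = step(t)
--         return False
--
--     k = 0
--     cur = num
--     while not seen_before(k, cur):
--         cur = step(cur)
--         k += 1
--     return k
-- ===== Notes on version B (the rewrite author's own statement) =====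
-- stated objective: alternative
-- what changed: Replaces A's visited-set membership loop by an O(1)-memory scheme: the step count advances while a helper re-walks the trajectory prefix from the start to decide whether the current value already occurred (pointer-chasing membership instead of a set).
import Mathlib
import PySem

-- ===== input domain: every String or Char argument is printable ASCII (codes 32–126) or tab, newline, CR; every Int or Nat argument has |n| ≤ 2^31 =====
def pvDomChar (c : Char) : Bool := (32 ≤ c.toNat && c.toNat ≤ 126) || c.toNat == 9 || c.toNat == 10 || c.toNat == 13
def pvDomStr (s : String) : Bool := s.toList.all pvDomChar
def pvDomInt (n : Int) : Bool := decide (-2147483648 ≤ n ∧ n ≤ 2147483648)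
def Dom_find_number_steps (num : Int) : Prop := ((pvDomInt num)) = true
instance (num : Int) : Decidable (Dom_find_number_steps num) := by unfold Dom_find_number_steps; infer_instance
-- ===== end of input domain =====

-- B replaces A's visited set by O(1)-memory membership that re-walks the trajectory prefix
-- from the start (objective: alternative; same return value on all non-negative inputs).


-- ===== PORT A =====
-- one body of A's while loop: digits of str(num).zfill(4), sort asc/desc, subtract.
-- int("...") raises (ofChars? = none) only for num < 0 — excluded by Pre_; .getD 0 is never reached inside Pre_.
def kapStepA (num : Int) : Int :=
  let digits := PySem.Chars.zfill (PySem.Int.toChars num) 4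
  let ascending := (PySem.Int.ofChars? (PySem.List.sorted digits (fun c => c) false)).getD 0
  let descending := (PySem.Int.ofChars? (PySem.List.sorted digits (fun c => c) true)).getD 0
  descending - ascending

-- the while loop, with a fuel guard (1000 far exceeds any possible iteration count on Dom)
def findLoopA : Nat → PySem.Set Int → Int → Int → Int
  | 0, _, _, steps => steps
  | fuel + 1, seen, num, steps =>
    if PySem.Set.contains seen num then steps
    else findLoopA fuel (PySem.Set.add seen num) (kapStepA num) (steps + 1)

def find_number_steps (num : Int) : Int :=
  findLoopA 1000 PySem.Set.empty num 0

-- ===== PORT B =====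
-- B's step helper (same body as A's loop body computation)
def kapStepB (n : Int) : Int :=
  let digits := PySem.Chars.zfill (PySem.Int.toChars n) 4
  let ascending := (PySem.Int.ofChars? (PySem.List.sorted digits (fun c => c) false)).getD 0
  let descending := (PySem.Int.ofChars? (PySem.List.sorted digits (fun c => c) true)).getD 0
  descending - ascending

-- seen_before(k, x): walk t from num for k steps looking for x
def seenBeforeB : Nat → Int → Int → Bool
  | 0, _, _ => false
  | j + 1, t, x => if t == x then true else seenBeforeB j (kapStepB t) x

-- B's while loop, same fuel guard
def findLoopB (num : Int) : Nat → Int → Int → Int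
  | 0, k, _ => k
  | fuel + 1, k, cur =>
    if seenBeforeB k.toNat num cur then k
    else findLoopB num fuel (k + 1) (kapStepB cur)

def find_number_steps_alt (num : Int) : Int :=
  findLoopB num 1000 0 num

-- ===== PRECONDITION & SPEC =====
-- Pre_ excludes negative inputs: there Python A raises ValueError (int() on a digit string
-- ending in '-'), and B raises the same way; on every input A returns, Pre_ holds.
def Pre_find_number_steps (num : Int) : Prop := 0 ≤ num
instance (num : Int) : Decidable (Pre_find_number_steps num) := by unfold Pre_find_number_steps; infer_instance
def pvWitness_find_number_steps : Int := 57

def Spec_find_number_steps (num : Int) (out : Int) : Prop := out = find_number_steps_alt num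
instance (num : Int) (out : Int) : Decidable (Spec_find_number_steps num out) := by unfold Spec_find_number_steps; infer_instance

-- ===== CLAIM (what is proved, stated in full; the proofs are below) =====
def Claim_equal_find_number_steps : Prop := ∀ (num : Int), Dom_find_number_steps num → Pre_find_number_steps num → Spec_find_number_steps num (find_number_steps num)

-- ===== LEMMAS AND PROOFS =====

theorem kapStep_eq : kapStepA = kapStepB := rfl

theorem seenBeforeB_iff (x : Int) : ∀ (j : Nat) (t : Int),
    seenBeforeB j t x = true ↔ ∃ i < j, kapStepA^[i] t = x := by
  intro j
  induction j with
  | zero => intro t; simp [seenBeforeB]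
  | succ j ih =>
    intro t
    simp only [seenBeforeB]
    by_cases h : t = x
    · simp [h]
      exact ⟨0, by omega, by simpa using h⟩
    · simp only [beq_iff_eq, h, if_false]
      rw [ih (kapStepB t)]
      constructor
      · rintro ⟨i, hi, hx⟩
        exact ⟨i + 1, by omega, by simpa [Function.iterate_succ_apply, kapStep_eq] using hx⟩
      · rintro ⟨i, hi, hx⟩
        match i with
        | 0 => exact absurd (by simpa using hx) h
        | i + 1 =>
          exact ⟨i, by omega, by simpa [Function.iterate_succ_apply, kapStep_eq] using hx⟩

theorem loop_eq (num : Int) : ∀ (fuel : Nat) (k : Nat) (seen : PySem.Set Int),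
    (∀ x, PySem.Set.contains seen x = true ↔ ∃ i < k, kapStepA^[i] num = x) →
    findLoopA fuel seen (kapStepA^[k] num) (k : Int) = findLoopB num fuel (k : Int) (kapStepA^[k] num) := by
  intro fuel
  induction fuel with
  | zero => intro k seen _; rfl
  | succ fuel ih =>
    intro k seen hinv
    simp only [findLoopA, findLoopB]
    have hk : ((k : Int)).toNat = k := by simp
    rw [hk]
    have hmem : kapStepA^[k] num ∈ seen ↔ seenBeforeB k num (kapStepA^[k] num) = true :=
      ((PySem.Set.contains_iff seen _).symm.trans (hinv _)).trans
        (seenBeforeB_iff _ k num).symm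
    by_cases hb : seenBeforeB k num (kapStepA^[k] num) = true
    · rw [if_pos (by simpa [PySem.Set.contains_iff] using hmem.mpr hb), hb, if_pos rfl]
    · have hm : ¬ (kapStepA^[k] num ∈ seen) := fun h => hb (hmem.mp h)
      rw [if_neg (by simpa [PySem.Set.contains_iff] using hm),
          if_neg (by simpa using hb)]
      have hstepA : kapStepA (kapStepA^[k] num) = kapStepA^[k + 1] num :=
        (Function.iterate_succ_apply' kapStepA k num).symm
      have hstepB : kapStepB (kapStepA^[k] num) = kapStepA^[k + 1] num := by
        rw [← kapStep_eq]; exact hstepA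
      rw [hstepA, hstepB]
      have hinv' : ∀ x, PySem.Set.contains (PySem.Set.add seen (kapStepA^[k] num)) x = true
          ↔ ∃ i < k + 1, kapStepA^[i] num = x := by
        intro x
        rw [PySem.Set.contains_iff, PySem.Set.mem_add, ← PySem.Set.contains_iff, hinv]
        constructor
        · rintro (⟨i, hi, hx⟩ | hx)
          · exact ⟨i, by omega, hx⟩
          · exact ⟨k, by omega, hx.symm⟩
        · rintro ⟨i, hi, hx⟩
          by_cases hik : i = k
          · exact Or.inr (by rw [← hx, hik])
          · exact Or.inl ⟨i, by omega, hx⟩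
      have := ih (k + 1) (PySem.Set.add seen (kapStepA^[k] num)) hinv'
      push_cast at this ⊢
      exact this

-- ===== VERDICT (by name: the statement is the Claim_ definition above) =====
theorem find_number_steps_spec : Claim_equal_find_number_steps := by
  intro num _ _
  unfold Spec_find_number_steps find_number_steps find_number_steps_alt
  have h := loop_eq num 1000 0 PySem.Set.empty (by intro x; simp [PySem.Set.empty])
  simpa using h
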